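-- pv_equiv track=rewrite | github.com/NobuyukiInoue/LeetCode | Problems/1400_1499/1417_Reformat_The_String/Project_Python3/Reformat_The_String.py | reformat2
-- ===== SOURCE A (Python) =====
-- def reformat2(s):
--     # 48ms
--     if not s:
--         return ""
--     string, digits = [], []
--     for i in s:
--         if i.isdigit():
--             digits.append(i)
--         else:
--             string.append(i)
--
--     if abs(len(string) - len(digits)) > 1:
--         return ""
--
--     if len(string) < len(digits):
--         string, digits = digits, string
--
--     res = ""
--     for i in range(len(digits)):
--         res += "".join(string[i] + digits[i])
--
--     return res + string[-1] if len(string) != len(digits) else res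
-- ===== SOURCE B (Python) =====
-- def reformat2(s):
--     digits = [c for c in s if c.isdigit()]
--     letters = [c for c in s if not c.isdigit()]
--     if abs(len(letters) - len(digits)) > 1:
--         return ""
--     first, second = (letters, digits) if len(letters) >= len(digits) else (digits, letters)
--
--     def weave(x, y):
--         return [x[0]] + weave(y, x[1:]) if x else []
--
--     return "".join(weave(first, second))
-- ===== Notes on version B (the rewrite author's own statement) =====
-- stated objective: alternative
-- what changed: Replaces the index-based range loop plus explicit leftover append with a recursive alternating weave over the two partitions (take the head of the longer list, recurse with the lists swapped), so no indexing and no special trailing-element case is needed.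
import Mathlib
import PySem

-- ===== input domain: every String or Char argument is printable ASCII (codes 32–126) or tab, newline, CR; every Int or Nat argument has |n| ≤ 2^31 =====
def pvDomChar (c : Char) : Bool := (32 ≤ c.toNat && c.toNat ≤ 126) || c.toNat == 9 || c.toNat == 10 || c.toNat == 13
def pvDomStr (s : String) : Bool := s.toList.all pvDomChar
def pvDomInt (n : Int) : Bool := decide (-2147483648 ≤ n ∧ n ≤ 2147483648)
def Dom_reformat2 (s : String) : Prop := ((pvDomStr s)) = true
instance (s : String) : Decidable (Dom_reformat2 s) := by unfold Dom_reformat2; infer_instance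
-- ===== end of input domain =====

-- B interleaves the letter/digit partitions by a recursive weave instead of A's index loop + leftover append; same value on every input.

-- ===== PORT A =====
def reformat2 (s : String) : String :=
  if s.toList = [] then "" else
  let p := s.toList.foldl
    (fun (acc : List Char × List Char) i =>
      if PySem.Chars.isdigit i then (acc.1, acc.2 ++ [i]) else (acc.1 ++ [i], acc.2))
    ([], [])
  if ((p.1.length : Int) - (p.2.length : Int)).natAbs > 1 then "" else
  let q := if p.1.length < p.2.length then (p.2, p.1) else (p.1, p.2)
  let res := (PySem.List.pyRange 0 (q.2.length : Int) 1).foldl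
    (fun (res : List Char) i =>
      res ++ [PySem.List.pyGetD q.1 i ' ', PySem.List.pyGetD q.2 i ' '])
    []
  if q.1.length ≠ q.2.length then String.ofList (res ++ [PySem.List.pyGetD q.1 (-1) ' '])
  else String.ofList res

-- ===== PORT B =====
def weaveB : List Char → List Char → List Char
  | [], _ => []
  | a :: x, y => a :: weaveB y x
termination_by x y => x.length + y.length
decreasing_by simp; omega

def reformat2_alt (s : String) : String :=
  let digits := s.toList.filter (fun c => PySem.Chars.isdigit c)
  let letters := s.toList.filter (fun c => !PySem.Chars.isdigit c)
  if ((letters.length : Int) - (digits.length : Int)).natAbs > 1 then "" else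
  let fp := if letters.length ≥ digits.length then (letters, digits) else (digits, letters)
  String.ofList (weaveB fp.1 fp.2)

-- ===== PRECONDITION & SPEC =====
def Spec_reformat2 (s : String) (out : String) : Prop := out = reformat2_alt s
instance (s : String) (out : String) : Decidable (Spec_reformat2 s out) := by unfold Spec_reformat2; infer_instance

-- ===== CLAIM (what is proved, stated in full; the proofs are below) =====
def Claim_equal_reformat2 : Prop := ∀ (s : String), Dom_reformat2 s → Spec_reformat2 s (reformat2 s)

-- ===== LEMMAS AND PROOFS =====

-- A's fold-partition is the pair of filters.
theorem partition_eq (l : List Char) (a b : List Char) :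
    l.foldl
      (fun (acc : List Char × List Char) i =>
        if PySem.Chars.isdigit i then (acc.1, acc.2 ++ [i]) else (acc.1 ++ [i], acc.2))
      (a, b)
    = (a ++ l.filter (fun c => !PySem.Chars.isdigit c), b ++ l.filter (fun c => PySem.Chars.isdigit c)) := by
  induction l generalizing a b with
  | nil => simp
  | cons c t ih =>
    by_cases h : PySem.Chars.isdigit c = true <;>
      simp [List.foldl_cons, h, ih]

-- A's index loop builds the flattened zip of the prefixes.
theorem loopA_eq (x y : List Char) (n : Nat) (hx : n ≤ x.length) (hy : n ≤ y.length) :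
    (PySem.List.pyRange 0 (n : Int) 1).foldl
      (fun (res : List Char) i =>
        res ++ [PySem.List.pyGetD x i ' ', PySem.List.pyGetD y i ' '])
      []
    = (List.zipWith (fun a b => [a, b]) (x.take n) (y.take n)).flatten := by
  induction n with
  | zero => simp [PySem.List.pyRange_one_eq_nil]
  | succ n ih =>
    have h1 : ((n + 1 : Nat) : Int) = (n : Int) + 1 := by push_cast; ring
    rw [h1, PySem.List.pyRange_one_succ_right (by positivity)]
    rw [List.foldl_append, ih (by omega) (by omega)]
    have hxg : x.take (n+1) = x.take n ++ [x[n]] := by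
      rw [List.take_add_one]; simp [List.getElem?_eq_getElem (by omega : n < x.length)]
    have hyg : y.take (n+1) = y.take n ++ [y[n]] := by
      rw [List.take_add_one]; simp [List.getElem?_eq_getElem (by omega : n < y.length)]
    rw [hxg, hyg, List.zipWith_append (by simp; omega)]
    simp [PySem.List.pyGetD_natCast, List.getD,
      List.getElem?_eq_getElem (by omega : n < x.length),
      List.getElem?_eq_getElem (by omega : n < y.length)]
    exact ⟨rfl, rfl⟩

-- B's weave is that flattened zip followed by the leftover of the longer list.
theorem zipWith_take_left (f : Char → Char → List Char) :
    ∀ (y x : List Char), y.length ≤ x.length →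
      List.zipWith f (List.take y.length x) y = List.zipWith f x y
  | [], x, _ => by simp
  | b :: t, a :: x', h => by
    simp only [List.length_cons, List.take_succ_cons, List.zipWith_cons_cons]
    rw [zipWith_take_left f t x' (by simpa using h)]

theorem weaveB_eq (y x : List Char) (h1 : y.length ≤ x.length) (h2 : x.length ≤ y.length + 1) :
    weaveB x y = (List.zipWith (fun a b => [a, b]) x y).flatten ++ x.drop y.length := by
  induction y generalizing x with
  | nil =>
    match x, h1, h2 with
    | [], _, _ => simp [weaveB]
    | [a], _, _ => simp [weaveB]
  | cons b t ih =>
    match x, h1, h2 with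
    | a :: x', h1, h2 =>
      have := ih x' (by simpa using h1) (by simpa using h2)
      simp [weaveB, this]

-- the core: A's loop plus trailing element equals weaveB, for the swapped pair.
theorem core_eq (x y : List Char) (h1 : y.length ≤ x.length) (h2 : x.length ≤ y.length + 1) :
    ((PySem.List.pyRange 0 (y.length : Int) 1).foldl
      (fun (res : List Char) i =>
        res ++ [PySem.List.pyGetD x i ' ', PySem.List.pyGetD y i ' '])
      [])
    ++ (if x.length ≠ y.length then [PySem.List.pyGetD x (-1) ' '] else [])
    = weaveB x y := by
  rw [loopA_eq x y y.length h1 le_rfl, List.take_length,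
      zipWith_take_left _ y x h1, weaveB_eq y x h1 h2]
  by_cases heq : x.length = y.length
  · simp [heq, List.drop_of_length_le]
  · have hlen : x.length = y.length + 1 := by omega
    have hne : x ≠ [] := by intro h; subst h; simp at hlen
    have : x.drop y.length = [x.getLast hne] := by
      have := List.dropLast_append_getLast hne
      conv_lhs => rw [← this]
      rw [List.drop_append_of_le_length (by simp [List.length_dropLast]; omega)]
      simp [List.length_dropLast, hlen]
    rw [this, PySem.List.pyGetD_neg_one x ' ' hne]
    simp [heq]

theorem reformat2_eq_alt (s : String) : reformat2 s = reformat2_alt s := by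
  unfold reformat2 reformat2_alt
  by_cases hs : s.toList = []
  · simp [hs, weaveB]
  · simp only [hs, if_false]
    rw [partition_eq]
    set L := s.toList.filter (fun c => !PySem.Chars.isdigit c) with hL
    set D := s.toList.filter (fun c => PySem.Chars.isdigit c) with hD
    simp only [List.nil_append]
    by_cases habs : ((L.length : Int) - (D.length : Int)).natAbs > 1
    · simp [habs]
    · simp only [habs, if_false]
      by_cases hlt : L.length < D.length
      · have hge : ¬ L.length ≥ D.length := by omega
        simp only [hlt, hge, if_true, if_false]
        rw [← core_eq D L (by omega) (by omega)]
        by_cases h : D.length = L.length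
        · omega
        · simp [h]
      · have hge : L.length ≥ D.length := by omega
        simp only [hlt, hge, if_true, if_false]
        rw [← core_eq L D (by omega) (by omega)]
        by_cases h : L.length = D.length
        · simp [h]
        · simp [h]

-- ===== VERDICT (by name: the statement is the Claim_ definition above) =====
theorem reformat2_spec : Claim_equal_reformat2 := by
  intro s _
  unfold Spec_reformat2
  exact reformat2_eq_alt s
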